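-- pv_equiv track=rewrite | github.com/IlyaOrlov/PythonCourse2.0_September23 | Practice/julmakarova/task5_4.py | del_column
-- ===== SOURCE A (Python) =====
-- def del_column(s, flag):
--     for x in s:
--         i = 0
--         while i != len(x):
--             if x[i] == flag:
--                 for lst in s:
--                     lst.pop(i)
--             else:
--                 i += 1
--     return s
-- ===== SOURCE B (Python) =====
-- def del_column(s, flag):
--     # Two passes: collect flagged column indices once, then delete them from every
--     # row in descending order (mutates the row lists in place, like the original).
--     cols = {i for row in s for i, v in enumerate(row) if v == flag}
--     for i in sorted(cols, reverse=True):
--         for row in s: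
--             del row[i]
--     return s
-- ===== Notes on version B (the rewrite author's own statement) =====
-- stated objective: simpler
-- what changed: Instead of rescanning and re-shifting the matrix with a while-loop that pops a column from every row the moment a flag cell is found, B collects the set of flagged column indices in one pass over the original matrix and then deletes exactly those columns from each row in descending index order.
import Mathlib
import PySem

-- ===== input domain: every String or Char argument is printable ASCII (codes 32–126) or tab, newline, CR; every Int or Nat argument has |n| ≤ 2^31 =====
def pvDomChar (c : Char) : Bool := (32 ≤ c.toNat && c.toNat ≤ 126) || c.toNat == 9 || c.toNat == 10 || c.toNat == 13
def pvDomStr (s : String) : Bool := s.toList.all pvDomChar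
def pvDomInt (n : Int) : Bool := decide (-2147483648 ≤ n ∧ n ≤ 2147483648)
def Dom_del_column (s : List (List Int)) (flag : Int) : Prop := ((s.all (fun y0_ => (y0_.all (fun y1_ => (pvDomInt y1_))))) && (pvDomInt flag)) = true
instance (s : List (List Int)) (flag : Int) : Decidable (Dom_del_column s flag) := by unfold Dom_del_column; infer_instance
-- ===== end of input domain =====

-- Note: the Python versions mutate the row lists of s in place and return s; the
-- equivalence proved here is about the RETURN value (on Pre_ the final in-place
-- states coincide as well, since both delete the same columns).

-- ===== PORT A =====
-- 'for lst in s: lst.pop(i)' — none = some row raised IndexError (outside Pre_).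
def popAllA (m : List (List Int)) (i : Nat) : Option (List (List Int)) :=
  m.mapM (fun lst => (PySem.List.pop? lst (i : Int)).map (fun r => r.2))

-- the 'while i != len(x)' loop of A, scanning row k of the current matrix m;
-- fuel only makes the loop total (each step pops a column or advances i).
def innerA (flag : Int) : Nat → List (List Int) → Nat → Nat → List (List Int)
  | 0, m, _, _ => m
  | fuel+1, m, k, i =>
    let x := m.getD k []
    if i = x.length then m
    else
      match PySem.List.pyGet? x (i : Int) with
      | none => m            -- IndexError (unreachable: 0 ≤ i < len x)
      | some v =>
        if v = flag then
          match popAllA m i with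
          | none => m        -- IndexError while popping: outside Pre_
          | some m' => innerA flag fuel m' k i
        else innerA flag fuel m k (i+1)

def del_column (s : List (List Int)) (flag : Int) : List (List Int) :=
  (List.range s.length).foldl
    (fun m k => innerA flag (2 * (m.map List.length).sum + 1) m k 0) s

-- ===== PORT B =====
-- cols = {i for row in s for i, v in enumerate(row) if v == flag}
-- for i in sorted(cols, reverse=True): for row in s: del row[i]
-- (del row[i]: i ≥ 0 always; out of range = IndexError = outside Pre_, eraseIdx there is unused)
def del_column_alt (s : List (List Int)) (flag : Int) : List (List Int) :=
  let cols : List Int := PySem.Set.ofList (s.flatMap (fun row =>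
    (PySem.List.enumerate row).filterMap (fun p => if p.2 = flag then some p.1 else none)))
  let ordered := PySem.List.sorted cols (fun x => x) true
  ordered.foldl (fun m i => m.map (fun row => row.eraseIdx i.toNat)) s

-- ===== PRECONDITION & SPEC =====
-- Pre_: every flagged cell sits in a column index smaller than every row's length —
-- exactly the inputs where A's pops (and B's dels) never raise IndexError.
def Pre_del_column (s : List (List Int)) (flag : Int) : Prop :=
  ∀ row ∈ s, ∀ p ∈ PySem.List.enumerate row, p.2 = flag →
    ∀ r ∈ s, p.1 < (r.length : Int)
instance (s : List (List Int)) (flag : Int) : Decidable (Pre_del_column s flag) := by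
  unfold Pre_del_column; infer_instance

def pvWitness_del_column : List (List Int) × Int := ([[1, 2, 3], [4, 2, 5]], 2)

def Spec_del_column (s : List (List Int)) (flag : Int) (out : List (List Int)) : Prop := out = del_column_alt s flag
instance (s : List (List Int)) (flag : Int) (out : List (List Int)) : Decidable (Spec_del_column s flag out) := by unfold Spec_del_column; infer_instance

-- ===== CLAIM (what is proved, stated in full; the proofs are below) =====
def Claim_equal_del_column : Prop := ∀ (s : List (List Int)) (flag : Int), Dom_del_column s flag → Pre_del_column s flag → Spec_del_column s flag (del_column s flag)


-- ===== LEMMAS AND PROOFS =====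

-- row restricted to a list of (original) column indices; out-of-range indices contribute nothing
def pvRrow (row : List Int) (cols : List Nat) : List Int :=
  cols.filterMap (fun j => row[j]?)

def pvRestrict (s : List (List Int)) (cols : List Nat) : List (List Int) :=
  s.map (fun r => pvRrow r cols)

theorem pvRrow_append (row : List Int) (c1 c2 : List Nat) :
    pvRrow row (c1 ++ c2) = pvRrow row c1 ++ pvRrow row c2 := by
  simp [pvRrow]

theorem pvRrow_eq_map (row : List Int) (cols : List Nat)
    (h : ∀ j ∈ cols, j < row.length) :
    pvRrow row cols = cols.map (fun j => row.getD j 0) := by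
  induction cols with
  | nil => simp [pvRrow]
  | cons c cs ih =>
    have hc := h c (by simp)
    simp only [pvRrow, List.filterMap_cons] at *
    rw [List.getElem?_eq_getElem hc]
    simp only [List.map_cons, List.cons.injEq]
    refine ⟨by rw [List.getD_eq_getElem _ _ hc], ih (fun j hj => h j (by simp [hj]))⟩

theorem pvRrow_length (row : List Int) (cols : List Nat)
    (h : ∀ j ∈ cols, j < row.length) :
    (pvRrow row cols).length = cols.length := by
  rw [pvRrow_eq_map row cols h]; simp

theorem pvRrow_filter_lt (row : List Int) (cols : List Nat) :
    pvRrow row cols = pvRrow row (cols.filter (fun j => decide (j < row.length))) := by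
  induction cols with
  | nil => simp [pvRrow]
  | cons c cs ih =>
    by_cases hc : c < row.length
    · simp only [pvRrow] at ih
      simp only [pvRrow, List.filterMap_cons, List.filter_cons, hc, decide_true,
        List.filterMap_cons, List.getElem?_eq_getElem hc]
      simp [List.getElem?_eq_getElem hc, ih]
    · have hn : row[c]? = none := by
        rw [List.getElem?_eq_none_iff]; omega
      simp only [pvRrow] at ih
      simp only [pvRrow, List.filterMap_cons, List.filter_cons, hc, decide_false, hn]
      simp [ih]

theorem pvRrow_range_self (row : List Int) :
    pvRrow row (List.range row.length) = row := by
  rw [pvRrow_eq_map _ _ (by simp [List.mem_range])]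
  apply List.ext_getElem
  · simp
  · intro i h1 h2
    simp [List.getD_eq_getElem?_getD, List.getElem?_eq_getElem h2]

theorem pvRestrict_getD (s : List (List Int)) (cols : List Nat) (k : Nat) :
    (pvRestrict s cols).getD k [] = pvRrow (s.getD k []) cols := by
  by_cases hk : k < s.length
  · simp [pvRestrict, List.getD_eq_getElem?_getD, List.getElem?_map,
      List.getElem?_eq_getElem hk]
  · have h1 : s[k]? = none := by rw [List.getElem?_eq_none_iff]; omega
    have h2 : (s.map (fun r => pvRrow r cols))[k]? = none := by
      rw [List.getElem?_eq_none_iff]; simp; omega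
    simp [pvRestrict, List.getD_eq_getElem?_getD, h1, pvRrow]

theorem pvFilter_range_lt (M L : Nat) (h : L ≤ M) :
    (List.range M).filter (fun j => decide (j < L)) = List.range L := by
  induction M with
  | zero =>
    have : L = 0 := by omega
    simp [this]
  | succ M ih =>
    by_cases hL : L = M + 1
    · subst hL
      rw [List.filter_eq_self.2]
      intro a ha; simp only [List.mem_range] at ha; simp; omega
    · have hLM : L ≤ M := by omega
      rw [List.range_succ, List.filter_append, ih hLM]
      have h1 : (List.filter (fun j => decide (j < L)) [M]) = [] := by
        simp; omega
      simp [h1]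

theorem pvRrow_shift (row : List Int) (d : Nat) :
    ∀ (m t : Nat), d ≤ t →
    pvRrow (row.eraseIdx d) (List.range' t m) = pvRrow row (List.range' (t+1) m) := by
  intro m
  induction m with
  | zero => intro t _; simp [pvRrow]
  | succ m ih =>
    intro t ht
    rw [List.range'_succ, List.range'_succ]
    simp only [pvRrow, List.filterMap_cons]
    have h1 : (row.eraseIdx d)[t]? = row[t+1]? := by
      rw [List.getElem?_eraseIdx_of_ge ht]
    rw [h1]
    have h2 := ih (t+1) (by omega)
    simp only [pvRrow] at h2
    cases row[t+1]? <;> simp [h2]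

-- pop? at rank done.length of a restricted row picks out exactly column j
theorem pvPop_rrow (row : List Int) (done rest : List Nat) (j : Nat)
    (hdone : ∀ d ∈ done, d < j) (hj : j < row.length) :
    PySem.List.pop? (pvRrow row (done ++ j :: rest)) ((done.length : Nat) : Int)
      = some (row[j], pvRrow row (done ++ rest)) := by
  have hdl : ∀ d ∈ done, d < row.length := fun d hd => lt_trans (hdone d hd) hj
  have hsplit : pvRrow row (done ++ j :: rest)
      = pvRrow row done ++ row[j] :: pvRrow row rest := by
    rw [pvRrow_append]
    simp [pvRrow, List.getElem?_eq_getElem hj]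
  have hlen : (pvRrow row done).length = done.length := pvRrow_length _ _ hdl
  have hn : done.length < (pvRrow row done ++ row[j] :: pvRrow row rest).length := by
    simp [hlen]
  rw [hsplit, PySem.List.pop?_natCast _ _ hn]
  have hv : (pvRrow row done ++ row[j] :: pvRrow row rest)[done.length] = row[j] := by
    rw [List.getElem_append_right (by omega)]
    simp [hlen]
  have he : (pvRrow row done ++ row[j] :: pvRrow row rest).eraseIdx done.length
      = pvRrow row done ++ pvRrow row rest := by
    rw [List.eraseIdx_append_of_length_le (by omega)]
    simp [hlen]
  rw [hv, he, pvRrow_append]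

theorem pvPopAll_restrict (done rest : List Nat) (j : Nat)
    (hdone : ∀ d ∈ done, d < j) :
    ∀ (s' : List (List Int)), (∀ r ∈ s', j < r.length) →
    popAllA (pvRestrict s' (done ++ j :: rest)) done.length
      = some (pvRestrict s' (done ++ rest)) := by
  intro s'
  induction s' with
  | nil => intro _; simp [popAllA, pvRestrict]
  | cons r s' ih =>
    intro hj
    have hr : j < r.length := hj r (by simp)
    have hrec := ih (fun r' hr' => hj r' (by simp [hr']))
    simp only [popAllA, pvRestrict, List.map_cons, List.mapM_cons]
    rw [pvPop_rrow r done rest j hdone hr]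
    simp only [popAllA, pvRestrict] at hrec
    simp [hrec]

-- the while-loop of A filters the remaining columns by "row k does not hold flag there"
theorem pvInner_spec (flag : Int) (s : List (List Int)) (k : Nat) :
    ∀ (todo done : List Nat) (fuel : Nat),
    (done ++ todo).Pairwise (· < ·) →
    (∀ d ∈ done, d < (s.getD k []).length) →
    (∀ j ∈ todo, (s.getD k [])[j]? = some flag → ∀ r ∈ s, j < r.length) →
    todo.length < fuel →
    innerA flag fuel (pvRestrict s (done ++ todo)) k done.length
      = pvRestrict s (done ++ todo.filter (fun j => !((s.getD k [])[j]? == some flag))) := by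
  intro todo
  induction todo with
  | nil =>
    intro done fuel hpw hdone hflag hfuel
    cases fuel with
    | zero => omega
    | succ f =>
      simp only [innerA, List.append_nil, List.filter_nil]
      rw [pvRestrict_getD, pvRrow_length _ _ hdone]
      simp
  | cons j rest ih =>
    intro done fuel hpw hdone hflag hfuel
    cases fuel with
    | zero => simp at hfuel
    | succ f =>
      have hpwparts := List.pairwise_append.mp hpw
      have hjrest : ∀ a ∈ rest, j < a := (List.pairwise_cons.mp hpwparts.2.1).1
      by_cases hj : j < (s.getD k []).length
      · have hsplit : pvRrow (s.getD k []) (done ++ j :: rest)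
            = pvRrow (s.getD k []) done ++ (s.getD k [])[j] :: pvRrow (s.getD k []) rest := by
          rw [pvRrow_append]
          simp only [pvRrow, List.filterMap_cons]
          rw [List.getElem?_eq_getElem hj]
        have hlen : (pvRrow (s.getD k []) done).length = done.length :=
          pvRrow_length _ _ hdone
        simp only [innerA]
        rw [pvRestrict_getD, hsplit]
        rw [if_neg (by simp only [List.length_append, List.length_cons, hlen]; omega)]
        have hget : PySem.List.pyGet?
            (pvRrow (s.getD k []) done ++ (s.getD k [])[j] :: pvRrow (s.getD k []) rest)
            ((done.length : Nat) : Int) = some (s.getD k [])[j] := by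
          rw [← hlen]
          exact PySem.List.pyGet?_append_length _ _ _
        rw [hget]
        dsimp only
        by_cases hfl : (s.getD k [])[j] = flag
        · rw [if_pos hfl]
          have hjall : ∀ r ∈ s, j < r.length :=
            hflag j (by simp) (by rw [List.getElem?_eq_getElem hj, hfl])
          have hdj : ∀ d ∈ done, d < j := fun d hd => hpwparts.2.2 d hd j (by simp)
          rw [pvPopAll_restrict done rest j hdj s hjall]
          dsimp only
          rw [ih done f
            (hpw.sublist ((List.sublist_cons_self j rest).append_left done))
            hdone
            (fun a ha hfa => hflag a (by simp [ha]) hfa)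
            (by simp at hfuel ⊢; omega)]
          have hb : (!((s.getD k [])[j]? == some flag)) = false := by
            rw [List.getElem?_eq_getElem hj, hfl]; simp
          rw [List.filter_cons, hb]
          simp
        · rw [if_neg hfl]
          have harg : pvRestrict s (done ++ j :: rest)
              = pvRestrict s ((done ++ [j]) ++ rest) := by simp
          have hlen2 : done.length + 1 = (done ++ [j]).length := by simp
          rw [harg, hlen2]
          rw [ih (done ++ [j]) f
            (by rw [List.append_assoc]; simpa using hpw)
            (by intro d hd
                simp only [List.mem_append, List.mem_singleton] at hd
                rcases hd with hd | rfl
                · exact hdone d hd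
                · exact hj)
            (fun a ha hfa => hflag a (by simp [ha]) hfa)
            (by simp at hfuel ⊢; omega)]
          have hb : (!((s.getD k [])[j]? == some flag)) = true := by
            rw [List.getElem?_eq_getElem hj]
            simpa using hfl
          rw [List.filter_cons, hb]
          simp
      · have hnone : ∀ a ∈ j :: rest, (s.getD k [])[a]? = none := by
          intro a ha
          rw [List.getElem?_eq_none_iff]
          rcases List.mem_cons.mp ha with rfl | ha
          · omega
          · have := hjrest a ha; omega
        have hempty : pvRrow (s.getD k []) (j :: rest) = [] := by
          apply List.filterMap_eq_nil_iff.mpr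
          intro a ha
          rw [hnone a ha]
        have hkeep : (j :: rest).filter (fun a => !((s.getD k [])[a]? == some flag))
            = j :: rest := by
          apply List.filter_eq_self.mpr
          intro a ha
          rw [hnone a ha]
          simp
        simp only [innerA]
        rw [pvRestrict_getD, pvRrow_append, hempty, List.append_nil,
          pvRrow_length _ _ hdone, hkeep]
        simp

-- the outer for-loop composes the per-row filters
theorem pvOuter_go (flag : Int) (s : List (List Int))
    (hpre : ∀ (jn : Nat), (∃ r ∈ s, r[jn]? = some flag) → ∀ r ∈ s, jn < r.length)
    (r0 : List Int) (hr0 : r0 ∈ s) :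
    ∀ (ks : List Nat) (cols : List Nat),
    cols.Pairwise (· < ·) → (∀ j ∈ cols, j < r0.length) →
    ks.foldl (fun m k => innerA flag (2 * (m.map List.length).sum + 1) m k 0) (pvRestrict s cols)
      = pvRestrict s (cols.filter (fun j =>
          decide (∀ k ∈ ks, (s.getD k [])[j]? ≠ some flag))) := by
  intro ks
  induction ks with
  | nil =>
    intro cols hpw hbound
    simp only [List.foldl_nil]
    rw [List.filter_eq_self.mpr (by intro a _; simp)]
  | cons k ks ih =>
    intro cols hpw hbound
    simp only [List.foldl_cons]
    have hfuel : cols.length < 2 * ((pvRestrict s cols).map List.length).sum + 1 := by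
      have h1 : (pvRrow r0 cols).length = cols.length := pvRrow_length _ _ hbound
      have h2 : (pvRrow r0 cols).length ≤ ((pvRestrict s cols).map List.length).sum := by
        apply List.single_le_sum (by simp)
        exact List.mem_map_of_mem (List.mem_map_of_mem hr0)
      omega
    have hflag : ∀ j ∈ cols, (s.getD k [])[j]? = some flag → ∀ r ∈ s, j < r.length := by
      intro j _ hf
      by_cases hk : k < s.length
      · have hgd : s.getD k [] = s[k] := List.getD_eq_getElem s [] hk
        exact hpre j ⟨s[k], List.getElem_mem hk, by rwa [hgd] at hf⟩
      · have hgd : s.getD k [] = [] := by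
          rw [List.getD_eq_getElem?_getD, List.getElem?_eq_none_iff.mpr (by omega)]
          rfl
        rw [hgd] at hf
        simp at hf
    have hstep := pvInner_spec flag s k cols [] (2 * ((pvRestrict s cols).map List.length).sum + 1)
      (by simpa using hpw) (by simp) hflag hfuel
    simp only [List.nil_append, List.length_nil] at hstep
    rw [hstep]
    rw [ih (cols.filter (fun j => !((s.getD k [])[j]? == some flag)))
      (hpw.filter _)
      (fun j hj => hbound j (List.mem_of_mem_filter hj))]
    rw [List.filter_filter]
    apply congrArg
    apply List.filter_congr
    intro a _
    simp only [List.forall_mem_cons, Bool.decide_and, decide_not]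
    rw [Bool.and_comm, Bool.beq_eq_decide_eq ((s.getD k [])[a]?) (some flag)]

-- B side: the matrix-level fold is a per-row fold
theorem pvFoldl_map_erase (g : Int → List Int → List Int) :
    ∀ (ds : List Int) (m : List (List Int)),
    ds.foldl (fun m i => m.map (g i)) m = m.map (fun row => ds.foldl (fun r i => g i r) row) := by
  intro ds
  induction ds with
  | nil => intro m; simp
  | cons d ds ih =>
    intro m
    simp only [List.foldl_cons, ih, List.map_map]
    rfl

-- deleting strictly descending in-range indices = keeping the complementary columns
theorem pvErase_desc :
    ∀ (D : List Nat) (row : List Int), D.Pairwise (· > ·) → (∀ d ∈ D, d < row.length) →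
    D.foldl (fun r i => r.eraseIdx i) row
      = pvRrow row ((List.range row.length).filter (fun j => decide (j ∉ D))) := by
  intro D
  induction D with
  | nil =>
    intro row _ _
    simp only [List.foldl_nil]
    rw [List.filter_eq_self.mpr (by intro a _; simp)]
    exact (pvRrow_range_self row).symm
  | cons d rest ih =>
    intro row hpw hlt
    have hd : d < row.length := hlt d (by simp)
    have hrest : ∀ a ∈ rest, a < d := (List.pairwise_cons.mp hpw).1
    simp only [List.foldl_cons]
    rw [ih (row.eraseIdx d) (List.pairwise_cons.mp hpw).2
        (by intro a ha
            have h1 := hrest a ha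
            have h2 := List.length_eraseIdx_of_lt hd
            omega)]
    rw [List.length_eraseIdx_of_lt hd]
    -- split both index ranges at d
    have hsplit1 : List.range row.length
        = List.range' 0 d ++ d :: List.range' (d+1) (row.length - d - 1) := by
      rw [show row.length = d + (row.length - d - 1 + 1) by omega,
        List.range_eq_range', ← List.range'_append (s:=0) (m:=d) (n:=row.length-d-1+1) (step:=1)]
      simp [List.range'_succ]
    have hsplit2 : List.range (row.length - 1)
        = List.range' 0 d ++ List.range' d (row.length - d - 1) := by
      rw [show row.length - 1 = d + (row.length - d - 1) by omega,
        List.range_eq_range', ← List.range'_append (s:=0) (m:=d) (n:=row.length-d-1) (step:=1)]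
      simp
    rw [hsplit1, hsplit2, List.filter_append, List.filter_append]
    have hfd : (d :: List.range' (d+1) (row.length - d - 1)).filter (fun j => decide (j ∉ d :: rest))
        = List.range' (d+1) (row.length - d - 1) := by
      rw [List.filter_cons]
      simp only [List.mem_cons, decide_not]
      rw [if_neg (by simp)]
      apply List.filter_eq_self.mpr
      intro a ha
      have ha' : d + 1 ≤ a := by
        rcases List.mem_range'.mp ha with ⟨i, _, rfl⟩
        omega
      have h1 : ¬ a = d := by omega
      have h2 : a ∉ rest := fun hmem => by have := hrest a hmem; omega
      simp [h1, h2]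
    have hf1 : (List.range' 0 d).filter (fun j => decide (j ∉ d :: rest))
        = (List.range' 0 d).filter (fun j => decide (j ∉ rest)) := by
      apply List.filter_congr
      intro a ha
      have ha' : a < d := by
        rcases List.mem_range'.mp ha with ⟨i, hi, rfl⟩
        omega
      have hne : ¬ a = d := by omega
      simp [List.mem_cons, hne]
    have hf2 : (List.range' d (row.length - d - 1)).filter (fun j => decide (j ∉ rest))
        = List.range' d (row.length - d - 1) := by
      apply List.filter_eq_self.mpr
      intro a ha
      have ha' : d ≤ a := by
        rcases List.mem_range'.mp ha with ⟨i, _, rfl⟩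
        omega
      have : a ∉ rest := fun hmem => by have := hrest a hmem; omega
      simp [this]
    rw [hfd, hf1, hf2, pvRrow_append, pvRrow_append]
    congr 1
    · apply List.filterMap_congr
      intro a ha
      have ha' : a < d := by
        rcases List.mem_range'.mp (List.mem_of_mem_filter ha) with ⟨i, hi, rfl⟩
        omega
      exact List.getElem?_eraseIdx_of_lt ha'
    · exact pvRrow_shift row d (row.length - d - 1) d (le_refl d)

theorem pvExists_max (s : List (List Int)) (h : s ≠ []) :
    ∃ r ∈ s, ∀ r' ∈ s, r'.length ≤ r.length := by
  induction s with
  | nil => exact absurd rfl h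
  | cons a t ih =>
    rcases eq_or_ne t [] with rfl | ht
    · exact ⟨a, by simp, by simp⟩
    · obtain ⟨r, hr, hmax⟩ := ih ht
      by_cases hc : a.length ≤ r.length
      · refine ⟨r, by simp [hr], ?_⟩
        intro r' hr'
        rcases List.mem_cons.mp hr' with rfl | hr'
        · exact hc
        · exact hmax r' hr'
      · refine ⟨a, by simp, ?_⟩
        intro r' hr'
        rcases List.mem_cons.mp hr' with rfl | hr'
        · exact le_refl _
        · exact le_trans (hmax r' hr') (by omega)

theorem pvRrow_eq_self (r : List Int) (M : Nat) (h : r.length ≤ M) :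
    pvRrow r (List.range M) = r := by
  rw [pvRrow_filter_lt r (List.range M), pvFilter_range_lt M r.length h,
    pvRrow_range_self]

-- A's result, in closed form
theorem pvA_eq (s : List (List Int)) (flag : Int)
    (hpre' : ∀ (jn : Nat), (∃ r ∈ s, r[jn]? = some flag) → ∀ r ∈ s, jn < r.length)
    (r0 : List Int) (hr0 : r0 ∈ s) (hmax : ∀ r' ∈ s, r'.length ≤ r0.length) :
    del_column s flag = pvRestrict s ((List.range r0.length).filter (fun j =>
      decide (∀ k ∈ List.range s.length, (s.getD k [])[j]? ≠ some flag))) := by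
  have hinit : pvRestrict s (List.range r0.length) = s := by
    unfold pvRestrict
    have hrows : ∀ r ∈ s, pvRrow r (List.range r0.length) = id r :=
      fun r hr => pvRrow_eq_self r r0.length (hmax r hr)
    rw [List.map_congr_left hrows, List.map_id]
  calc del_column s flag
      = (List.range s.length).foldl
          (fun m k => innerA flag (2 * (m.map List.length).sum + 1) m k 0)
          (pvRestrict s (List.range r0.length)) := by rw [hinit]; rfl
    _ = _ := pvOuter_go flag s hpre' r0 hr0 (List.range s.length)
          (List.range r0.length) (List.pairwise_lt_range) (by intro j hj; simpa using hj)

theorem pvSorted_rev_pairwise_gt (xs : List Int) :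
    (PySem.List.sorted (PySem.Set.ofList xs) (fun x => x) true).Pairwise (· > ·) := by
  have h1 := PySem.List.sorted_pairwise_rev (PySem.Set.ofList xs) (fun x => x)
  have h2 : (PySem.List.sorted (PySem.Set.ofList xs) (fun x => x) true).Pairwise (· ≠ ·) :=
    (PySem.List.sorted_perm (PySem.Set.ofList xs) (fun x => x) true).nodup_iff.mpr
      (PySem.Set.nodup_ofList xs)
  exact (h1.and h2).imp (fun h => lt_of_le_of_ne h.1 (Ne.symm h.2))

-- B's result, in closed form
theorem pvAlt_eq (s : List (List Int)) (flag : Int)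
    (hpre' : ∀ (jn : Nat), (∃ r ∈ s, r[jn]? = some flag) → ∀ r ∈ s, jn < r.length) :
    del_column_alt s flag
      = s.map (fun r => pvRrow r ((List.range r.length).filter
          (fun j => decide (¬ ∃ r' ∈ s, r'[j]? = some flag)))) := by
  unfold del_column_alt
  have hmemL : ∀ (i : Int), (i ∈ s.flatMap (fun row =>
      (PySem.List.enumerate row).filterMap (fun p => if p.2 = flag then some p.1 else none)))
      ↔ ∃ jn : Nat, i = (jn : Int) ∧ ∃ r ∈ s, r[jn]? = some flag := by
    intro i
    simp only [List.mem_flatMap, List.mem_filterMap]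
    constructor
    · rintro ⟨row, hrow, p, hp, hif⟩
      rcases (PySem.List.mem_enumerate_iff _ _ _).mp hp with ⟨k, hk, rfl⟩
      simp only at hif
      split at hif
      · rename_i hfl
        refine ⟨k, by simpa using hif.symm, row, hrow, ?_⟩
        exact List.getElem?_eq_some_iff.mpr ⟨hk, hfl⟩
      · exact absurd hif (by simp)
    · rintro ⟨jn, rfl, r, hr, hget⟩
      obtain ⟨hlt, hval⟩ := List.getElem?_eq_some_iff.mp hget
      refine ⟨r, hr, ((0 : Int) + (jn : Int), r[jn]),
        (PySem.List.mem_enumerate_iff r 0 _).mpr ⟨jn, hlt, rfl⟩, ?_⟩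
      simp [hval]
  have hmemO : ∀ (i : Int), (i ∈ PySem.List.sorted (PySem.Set.ofList (s.flatMap (fun row =>
      (PySem.List.enumerate row).filterMap (fun p => if p.2 = flag then some p.1 else none))))
      (fun x => x) true)
      ↔ ∃ jn : Nat, i = (jn : Int) ∧ ∃ r ∈ s, r[jn]? = some flag := by
    intro i
    rw [PySem.List.mem_sorted, PySem.Set.mem_ofList]
    exact hmemL i
  have hpwO := pvSorted_rev_pairwise_gt (s.flatMap (fun row =>
      (PySem.List.enumerate row).filterMap (fun p => if p.2 = flag then some p.1 else none)))
  rw [pvFoldl_map_erase (fun i row => row.eraseIdx i.toNat)]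
  apply List.map_congr_left
  intro r hr
  have hfm := List.foldl_map (f := Int.toNat)
    (g := fun (acc : List Int) (d : Nat) => acc.eraseIdx d)
    (l := PySem.List.sorted (PySem.Set.ofList (s.flatMap (fun row =>
      (PySem.List.enumerate row).filterMap (fun p => if p.2 = flag then some p.1 else none))))
      (fun x => x) true)
    (init := r)
  rw [← hfm]
  have hDmem : ∀ jn : Nat, jn ∈ (PySem.List.sorted (PySem.Set.ofList (s.flatMap (fun row =>
      (PySem.List.enumerate row).filterMap (fun p => if p.2 = flag then some p.1 else none))))
      (fun x => x) true).map Int.toNat ↔ ∃ r' ∈ s, r'[jn]? = some flag := by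
    intro jn
    rw [List.mem_map]
    constructor
    · rintro ⟨i, hi, rfl⟩
      rcases (hmemO i).mp hi with ⟨jn', rfl, hx⟩
      simpa using hx
    · intro hx
      exact ⟨(jn : Int), (hmemO _).mpr ⟨jn, rfl, hx⟩, by simp⟩
  have hDpw : ((PySem.List.sorted (PySem.Set.ofList (s.flatMap (fun row =>
      (PySem.List.enumerate row).filterMap (fun p => if p.2 = flag then some p.1 else none))))
      (fun x => x) true).map Int.toNat).Pairwise (· > ·) := by
    rw [List.pairwise_map]
    refine hpwO.imp_of_mem ?_
    intro a b ha hb hgt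
    rcases (hmemO b).mp hb with ⟨jb, rfl, _⟩
    omega
  have hDlt : ∀ d ∈ (PySem.List.sorted (PySem.Set.ofList (s.flatMap (fun row =>
      (PySem.List.enumerate row).filterMap (fun p => if p.2 = flag then some p.1 else none))))
      (fun x => x) true).map Int.toNat, d < r.length :=
    fun d hd => hpre' d ((hDmem d).mp hd) r hr
  rw [pvErase_desc _ r hDpw hDlt]
  congr 1
  apply List.filter_congr
  intro j _
  rw [decide_eq_decide]
  constructor
  · intro hnot hex
    exact hnot ((hDmem j).mpr hex)
  · intro hnot hmem
    exact hnot ((hDmem j).mp hmem)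

-- ===== VERDICT (by name: the statement is the Claim_ definition above) =====
theorem del_column_spec : Claim_equal_del_column := by
  intro s flag _ hpre
  unfold Spec_del_column
  rcases eq_or_ne s [] with rfl | hs
  · rfl
  · have hpre' : ∀ (jn : Nat), (∃ r ∈ s, r[jn]? = some flag) → ∀ r ∈ s, jn < r.length := by
      rintro jn ⟨r, hr, hget⟩ r' hr'
      obtain ⟨hlt, hval⟩ := List.getElem?_eq_some_iff.mp hget
      have hp : ((0 : Int) + (jn : Int), r[jn]) ∈ PySem.List.enumerate r :=
        (PySem.List.mem_enumerate_iff r 0 _).mpr ⟨jn, hlt, rfl⟩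
      have h2 := hpre r hr _ hp hval r' hr'
      simp only at h2
      omega
    obtain ⟨r0, hr0, hmax⟩ := pvExists_max s hs
    rw [pvA_eq s flag hpre' r0 hr0 hmax, pvAlt_eq s flag hpre']
    unfold pvRestrict
    apply List.map_congr_left
    intro r hr
    rw [pvRrow_filter_lt]
    have hchain : (((List.range r0.length).filter (fun j =>
        decide (∀ k ∈ List.range s.length, (s.getD k [])[j]? ≠ some flag))).filter
          (fun j => decide (j < r.length)))
        = ((List.range r.length).filter (fun j =>
            decide (∀ k ∈ List.range s.length, (s.getD k [])[j]? ≠ some flag))) := by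
      rw [List.filter_filter]
      rw [List.filter_congr (q := fun j =>
        (decide (∀ k ∈ List.range s.length, (s.getD k [])[j]? ≠ some flag) &&
          decide (j < r.length)))
        (by intro a _; simp [Bool.and_comm])]
      rw [← List.filter_filter, pvFilter_range_lt r0.length r.length (hmax r hr)]
    rw [hchain]
    congr 1
    apply List.filter_congr
    intro j _
    rw [decide_eq_decide]
    constructor
    · rintro h ⟨r', hr', hget⟩
      obtain ⟨k, hk, rfl⟩ := List.mem_iff_getElem.mp hr'
      exact h k (List.mem_range.mpr hk) (by rwa [List.getD_eq_getElem s [] hk])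
    · intro h k hk hget
      have hk' := List.mem_range.mp hk
      rw [List.getD_eq_getElem s [] hk'] at hget
      exact h ⟨s[k], List.getElem_mem hk', hget⟩
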